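-- pv_equiv track=rewrite | github.com/makeling/arcgis-server-custom-python-tools | batch_update_map_service_properties_tool/batch_update_map_service_properties_tool.py | printSplitLine
-- ===== SOURCE A (Python) =====
-- def printSplitLine(comment):
--     splitline = ""
--     count = 0
--     for i in range(50):
--         splitline += "-"
--         count += 1
--         if count == 25:
--             splitline += comment
--
--
--     return "\n" + splitline + "\n"
-- ===== SOURCE B (Python) =====
-- def printSplitLine(comment):
--     half = "-" * 25
--     return "\n" + half + comment + half + "\n"
-- ===== Notes on version B (the rewrite author's own statement) =====
-- stated objective: simpler
-- what changed: Replaces the 50-iteration character-append loop with a count sentinel by a closed-form concatenation of two precomputed 25-dash halves around the comment.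
import Mathlib
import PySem

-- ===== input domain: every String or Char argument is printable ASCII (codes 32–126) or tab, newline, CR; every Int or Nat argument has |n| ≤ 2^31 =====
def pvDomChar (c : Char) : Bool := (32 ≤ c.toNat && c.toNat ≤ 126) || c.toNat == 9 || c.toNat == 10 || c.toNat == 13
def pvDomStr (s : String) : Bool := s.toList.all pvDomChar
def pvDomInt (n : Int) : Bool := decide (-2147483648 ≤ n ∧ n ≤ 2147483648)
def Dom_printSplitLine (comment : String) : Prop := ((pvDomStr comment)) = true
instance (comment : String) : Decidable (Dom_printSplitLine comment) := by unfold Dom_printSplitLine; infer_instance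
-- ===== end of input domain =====

-- B replaces A's 50-step char-append loop by a closed-form concatenation of two 25-dash halves around the comment (simpler).


-- ===== PORT A =====
-- Port of A: fold over range(50), appending "-" each step, inserting comment when count==25.
def printSplitLine (comment : String) : String :=
  let st := (PySem.List.pyRange 0 50 1).foldl
    (fun (st : String × Int) _ =>
      let splitline := st.1 ++ "-"
      let count := st.2 + 1
      let splitline := if count == 25 then splitline ++ comment else splitline
      (splitline, count))
    ("", 0)
  "\n" ++ st.1 ++ "\n"

-- ===== PORT B =====
-- Port of B: closed-form concatenation of two 25-dash halves ('-' * 25) around the comment.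
def printSplitLine_alt (comment : String) : String :=
  let half := String.join (List.replicate 25 "-")
  "\n" ++ half ++ comment ++ half ++ "\n"

-- ===== PRECONDITION & SPEC =====
def Spec_printSplitLine (comment : String) (out : String) : Prop := out = printSplitLine_alt comment
instance (comment : String) (out : String) : Decidable (Spec_printSplitLine comment out) := by unfold Spec_printSplitLine; infer_instance

-- ===== CLAIM (what is proved, stated in full; the proofs are below) =====
def Claim_equal_printSplitLine : Prop := ∀ (comment : String), Dom_printSplitLine comment → Spec_printSplitLine comment (printSplitLine comment)

-- ===== LEMMAS AND PROOFS =====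

-- ===== VERDICT (by name: the statement is the Claim_ definition above) =====
theorem printSplitLine_spec : Claim_equal_printSplitLine := by
  intro comment _
  unfold Spec_printSplitLine printSplitLine printSplitLine_alt
  simp [PySem.List.pyRange, String.join, List.range_succ, List.foldl, String.append_assoc]
  have h : ∀ s : String, "\n" ++ ("------------------------" ++ ("-" ++ s)) = "\n-------------------------" ++ s := by
    intro s
    rw [← String.append_assoc, ← String.append_assoc]
    norm_num
    rfl
  exact h _
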